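-- pv_equiv track=rewrite | github.com/MrBrantCode/unitest_baseline | mut_generate/mist_train_taco/taco_3862/solution.py | count_different_periods
-- ===== SOURCE A (Python) =====
-- def count_different_periods(a: int, b: int) -> int:
--     n = a + b
--     ans = 0
--     l = 1
--     while l <= n:
--         g = n // l
--         if a < g or b < g:
--             l = n // g + 1
--             continue
--         r = n // g
--         a_low = (a + g) // (g + 1)
--         a_high = a // g
--         b_low = (b + g) // (g + 1)
--         b_high = b // g
--         if a_low <= a_high and b_low <= b_high:
--             ans += max(0, min(r, a_high + b_high) - max(l, a_low + b_low) + 1)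
--         l = r + 1
--     return ans
-- ===== SOURCE B (Python) =====
-- def count_different_periods(a: int, b: int) -> int:
--     n = a + b
--
--     def go(lo: int, hi: int) -> int:
--         if lo > hi:
--             return 0
--         g = n // hi
--         if g != n // lo:
--             mid = (lo + hi) // 2
--             return go(lo, mid) + go(mid + 1, hi)
--         if a < g or b < g:
--             return 0
--         a_low = (a + g) // (g + 1)
--         a_high = a // g
--         b_low = (b + g) // (g + 1)
--         b_high = b // g
--         if a_low > a_high or b_low > b_high:
--             return 0
--         lo2 = max(lo, a_low + b_low)
--         hi2 = min(hi, a_high + b_high)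
--         return hi2 - lo2 + 1 if lo2 <= hi2 else 0
--
--     return go(1, n)
-- ===== Notes on version B (the rewrite author's own statement) =====
-- stated objective: alternative
-- what changed: Replaced A's linear forward block walk (while l <= n computing g = n//l, the block end r = n//g, counting the block and jumping l = r + 1) by a recursive midpoint divide-and-conquer over the candidate range [1, n]: a segment is bisected until n//lo == n//hi, and only such constant-quotient leaves are evaluated; no block boundary n//g or jump l = r + 1 is ever computed.
import Mathlib
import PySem

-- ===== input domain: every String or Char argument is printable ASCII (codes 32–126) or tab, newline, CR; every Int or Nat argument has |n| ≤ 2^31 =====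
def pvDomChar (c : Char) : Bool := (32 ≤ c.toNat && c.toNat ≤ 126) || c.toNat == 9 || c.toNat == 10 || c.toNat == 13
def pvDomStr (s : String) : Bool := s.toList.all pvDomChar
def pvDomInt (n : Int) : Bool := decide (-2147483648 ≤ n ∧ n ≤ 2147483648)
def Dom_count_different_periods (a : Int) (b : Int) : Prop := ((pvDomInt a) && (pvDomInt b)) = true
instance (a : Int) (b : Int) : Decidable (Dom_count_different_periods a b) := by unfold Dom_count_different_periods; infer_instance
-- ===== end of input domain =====

-- B replaces A's linear block walk by a recursive midpoint divide-and-conquer over [1, n]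
-- that bisects until n//lo == n//hi (alternative structure, similar cost).

-- ===== PORT A =====
-- Termination facts for A's while loop (cited by `decreasing_by`).
theorem pv_g_pos (n l : Int) (h1 : 1 ≤ l) (h2 : l ≤ n) : 1 ≤ PySem.Int.floordiv n l := by
  rw [PySem.Int.le_floordiv_iff_mul_le (show (0:Int) < l by omega)]; omega

theorem pv_l_le_r (n l : Int) (h1 : 1 ≤ l) (h2 : l ≤ n) :
    l ≤ PySem.Int.floordiv n (PySem.Int.floordiv n l) := by
  have hg := pv_g_pos n l h1 h2
  rw [PySem.Int.le_floordiv_iff_mul_le (show (0:Int) < PySem.Int.floordiv n l by omega)]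
  have h3 : PySem.Int.floordiv n l ≤ PySem.Int.floordiv n l := le_refl _
  rw [PySem.Int.le_floordiv_iff_mul_le (show (0:Int) < l by omega)] at h3
  nlinarith

-- A's while loop, state (l, ans); the `1 ≤ l` conjunct in the guard only records the loop
-- invariant (l starts at 1 and only grows) needed for termination, it changes no reachable value.
def pvALoop (a b n l ans : Int) : Int :=
  if h : 1 ≤ l ∧ l ≤ n then
    let g := PySem.Int.floordiv n l
    if a < g ∨ b < g then
      pvALoop a b n (PySem.Int.floordiv n g + 1) ans
    else
      let r := PySem.Int.floordiv n g
      let a_low := PySem.Int.floordiv (a + g) (g + 1)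
      let a_high := PySem.Int.floordiv a g
      let b_low := PySem.Int.floordiv (b + g) (g + 1)
      let b_high := PySem.Int.floordiv b g
      let ans' := if a_low ≤ a_high ∧ b_low ≤ b_high then
          ans + max 0 (min r (a_high + b_high) - max l (a_low + b_low) + 1)
        else ans
      pvALoop a b n (r + 1) ans'
  else ans
termination_by (n + 1 - l).toNat
decreasing_by
  · have := pv_l_le_r n l h.1 h.2; omega
  · have := pv_l_le_r n l h.1 h.2; omega

def count_different_periods (a : Int) (b : Int) : Int :=
  pvALoop a b (a + b) 1 0

-- ===== PORT B =====
-- The midpoint (lo+hi)//2 of a non-degenerate segment stays inside it (cited by `decreasing_by`).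
theorem pv_mid (lo hi : Int) (h : lo < hi) :
    lo ≤ PySem.Int.floordiv (lo + hi) 2 ∧ PySem.Int.floordiv (lo + hi) 2 < hi := by
  have h1 : PySem.Int.floordiv (lo + hi) 2 ≤ PySem.Int.floordiv (lo + hi) 2 := le_refl _
  rw [PySem.Int.le_floordiv_iff_mul_le (show (0:Int) < 2 by omega)] at h1
  have h2 : PySem.Int.floordiv (lo + hi) 2 < PySem.Int.floordiv (lo + hi) 2 + 1 := by omega
  rw [PySem.Int.floordiv_lt_iff_lt_mul (show (0:Int) < 2 by omega)] at h2
  omega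

-- B's recursive helper go(lo, hi): bisect until the whole segment shares one quotient g = n // s.
def pvGo (a b n lo hi : Int) : Int :=
  if hd : hi < lo then 0
  else
    if hg : PySem.Int.floordiv n hi ≠ PySem.Int.floordiv n lo then
      pvGo a b n lo (PySem.Int.floordiv (lo + hi) 2) +
        pvGo a b n (PySem.Int.floordiv (lo + hi) 2 + 1) hi
    else
      let g := PySem.Int.floordiv n hi
      if a < g ∨ b < g then 0
      else
        let a_low := PySem.Int.floordiv (a + g) (g + 1)
        let a_high := PySem.Int.floordiv a g
        let b_low := PySem.Int.floordiv (b + g) (g + 1)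
        let b_high := PySem.Int.floordiv b g
        if a_high < a_low ∨ b_high < b_low then 0
        else
          let lo2 := max lo (a_low + b_low)
          let hi2 := min hi (a_high + b_high)
          if lo2 ≤ hi2 then hi2 - lo2 + 1 else 0
termination_by (hi - lo).toNat
decreasing_by
  · have hlt : lo < hi := by
      rcases lt_or_eq_of_le (show lo ≤ hi by omega) with h | h
      · exact h
      · exact absurd (by rw [h]) hg
    have := pv_mid lo hi hlt; omega
  · have hlt : lo < hi := by
      rcases lt_or_eq_of_le (show lo ≤ hi by omega) with h | h
      · exact h
      · exact absurd (by rw [h]) hg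
    have := pv_mid lo hi hlt; omega

def count_different_periods_alt (a : Int) (b : Int) : Int :=
  pvGo a b (a + b) 1 (a + b)

-- ===== PRECONDITION & SPEC =====
def Spec_count_different_periods (a : Int) (b : Int) (out : Int) : Prop := out = count_different_periods_alt a b
instance (a : Int) (b : Int) (out : Int) : Decidable (Spec_count_different_periods a b out) := by unfold Spec_count_different_periods; infer_instance

-- ===== CLAIM (what is proved, stated in full; the proofs are below) =====
def Claim_equal_count_different_periods : Prop := ∀ (a : Int) (b : Int), Dom_count_different_periods a b → Spec_count_different_periods a b (count_different_periods a b)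

-- ===== LEMMAS AND PROOFS =====

-- the per-candidate contribution of one s (0 or 1): both programs' totals are its sum over s = 1..n
def pvC (a b n s : Int) : Int :=
  let g := PySem.Int.floordiv n s
  if a < g ∨ b < g then 0
  else
    if PySem.Int.floordiv (a + g) (g + 1) ≤ PySem.Int.floordiv a g ∧
        PySem.Int.floordiv (b + g) (g + 1) ≤ PySem.Int.floordiv b g ∧
        PySem.Int.floordiv (a + g) (g + 1) + PySem.Int.floordiv (b + g) (g + 1) ≤ s ∧
        s ≤ PySem.Int.floordiv a g + PySem.Int.floordiv b g then 1 else 0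

theorem pv_div_nonneg (n g : Int) (hn : 0 ≤ n) (hg : 0 < g) : 0 ≤ PySem.Int.floordiv n g := by
  rw [PySem.Int.le_floordiv_iff_mul_le hg]; nlinarith

-- floor division is antitone in a positive divisor (for a nonnegative dividend)
theorem pv_div_anti (n d d' : Int) (hn : 0 ≤ n) (hd : 0 < d) (hdd : d ≤ d') :
    PySem.Int.floordiv n d' ≤ PySem.Int.floordiv n d := by
  have h0 : 0 ≤ PySem.Int.floordiv n d' := pv_div_nonneg n d' hn (by omega)
  have h1 : PySem.Int.floordiv n d' ≤ PySem.Int.floordiv n d' := le_refl _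
  rw [PySem.Int.le_floordiv_iff_mul_le (show (0:Int) < d' by omega)] at h1
  rw [PySem.Int.le_floordiv_iff_mul_le hd]
  nlinarith

-- counting the integers of [l, r] that lie in [lo, hi]
theorem pv_count_interval (lo hi : Int) : ∀ (k : Nat) (l r : Int), (r + 1 - l).toNat ≤ k →
    ((PySem.List.pyRange l (r + 1) 1).map (fun s => if lo ≤ s ∧ s ≤ hi then (1 : Int) else 0)).sum
      = max 0 (min r hi - max l lo + 1) := by
  intro k
  induction k with
  | zero =>
    intro l r hk
    rw [PySem.List.pyRange_one_eq_nil (by omega)]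
    simp only [List.map_nil, List.sum_nil]
    omega
  | succ k ih =>
    intro l r hk
    by_cases hl : r + 1 ≤ l
    · rw [PySem.List.pyRange_one_eq_nil hl]
      simp only [List.map_nil, List.sum_nil]
      omega
    · rw [PySem.List.pyRange_one_cons (by omega)]
      simp only [List.map_cons, List.sum_cons]
      rw [ih (l + 1) r (by omega)]
      split_ifs <;> omega

-- inside a quotient block [l, n//g] started at l (with g = n//l), n // s is constantly g
theorem pv_block_const (n l s g : Int) (h1 : 1 ≤ l) (h2 : l ≤ n)
    (hg : PySem.Int.floordiv n l = g) (hs1 : l ≤ s) (hs2 : s ≤ PySem.Int.floordiv n g) :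
    PySem.Int.floordiv n s = g := by
  have hgpos : 1 ≤ g := hg ▸ pv_g_pos n l h1 h2
  rw [PySem.Int.floordiv_eq_iff_of_pos (show (0:Int) < s by omega)]
  constructor
  · rw [PySem.Int.le_floordiv_iff_mul_le (show (0:Int) < g by omega)] at hs2
    nlinarith
  · have hlt : PySem.Int.floordiv n l < g + 1 := by omega
    rw [PySem.Int.floordiv_lt_iff_lt_mul (show (0:Int) < l by omega)] at hlt
    nlinarith

-- on an interval [lo, hi] where n // s is constantly g, the sum of the per-s
-- contributions is the min/max interval count
theorem pv_block_sum (a b n lo hi g : Int)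
    (hmem : ∀ s, lo ≤ s → s ≤ hi → PySem.Int.floordiv n s = g) :
    ((PySem.List.pyRange lo (hi + 1) 1).map (pvC a b n)).sum
      = (if a < g ∨ b < g then 0
         else
           if PySem.Int.floordiv (a + g) (g + 1) ≤ PySem.Int.floordiv a g ∧
              PySem.Int.floordiv (b + g) (g + 1) ≤ PySem.Int.floordiv b g then
             max 0 (min hi (PySem.Int.floordiv a g + PySem.Int.floordiv b g)
               - max lo (PySem.Int.floordiv (a + g) (g + 1) + PySem.Int.floordiv (b + g) (g + 1)) + 1)
           else 0) := by
  have hC : ∀ s ∈ PySem.List.pyRange lo (hi + 1) 1, pvC a b n s =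
      (if a < g ∨ b < g then 0
       else if PySem.Int.floordiv (a + g) (g + 1) ≤ PySem.Int.floordiv a g ∧
              PySem.Int.floordiv (b + g) (g + 1) ≤ PySem.Int.floordiv b g ∧
              PySem.Int.floordiv (a + g) (g + 1) + PySem.Int.floordiv (b + g) (g + 1) ≤ s ∧
              s ≤ PySem.Int.floordiv a g + PySem.Int.floordiv b g then (1 : Int) else 0) := by
    intro s hs
    rw [PySem.List.mem_pyRange_one] at hs
    simp only [pvC, hmem s hs.1 (by omega)]
  rw [List.map_congr_left hC]
  by_cases hskip : a < g ∨ b < g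
  · simp only [if_pos hskip]
    apply List.sum_eq_zero
    intro x hx
    rw [List.mem_map] at hx
    obtain ⟨s, _, hsx⟩ := hx
    omega
  · simp only [if_neg hskip]
    by_cases hfeas : PySem.Int.floordiv (a + g) (g + 1) ≤ PySem.Int.floordiv a g ∧
        PySem.Int.floordiv (b + g) (g + 1) ≤ PySem.Int.floordiv b g
    · simp only [if_pos hfeas]
      have heq : ∀ s ∈ PySem.List.pyRange lo (hi + 1) 1,
          (if PySem.Int.floordiv (a + g) (g + 1) ≤ PySem.Int.floordiv a g ∧
                  PySem.Int.floordiv (b + g) (g + 1) ≤ PySem.Int.floordiv b g ∧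
                  PySem.Int.floordiv (a + g) (g + 1) + PySem.Int.floordiv (b + g) (g + 1) ≤ s ∧
                  s ≤ PySem.Int.floordiv a g + PySem.Int.floordiv b g then (1 : Int) else 0)
          = (if PySem.Int.floordiv (a + g) (g + 1) + PySem.Int.floordiv (b + g) (g + 1) ≤ s ∧
               s ≤ PySem.Int.floordiv a g + PySem.Int.floordiv b g then (1 : Int) else 0) := by
        intro s _
        split_ifs <;> omega
      rw [List.map_congr_left heq]
      exact pv_count_interval _ _ (hi + 1 - lo).toNat lo hi (le_refl _)
    · simp only [if_neg hfeas]
      apply List.sum_eq_zero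
      intro x hx
      rw [List.mem_map] at hx
      obtain ⟨s, _, hsx⟩ := hx
      split_ifs at hsx <;> omega

-- A's loop from state (l, ans) returns ans plus the per-s contributions over s = l .. n
theorem pvALoop_eq_sum (a b n : Int) : ∀ (k : Nat) (l ans : Int), (n + 1 - l).toNat ≤ k → 1 ≤ l →
    pvALoop a b n l ans = ans + ((PySem.List.pyRange l (n + 1) 1).map (pvC a b n)).sum := by
  intro k
  induction k with
  | zero =>
    intro l ans hk hl
    rw [pvALoop, dif_neg (by omega), PySem.List.pyRange_one_eq_nil (by omega)]
    simp
  | succ k ih =>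
    intro l ans hk hl
    by_cases hln : l ≤ n
    · have hgpos : 1 ≤ PySem.Int.floordiv n l := pv_g_pos n l hl hln
      have hlr : l ≤ PySem.Int.floordiv n (PySem.Int.floordiv n l) := pv_l_le_r n l hl hln
      have hrn : PySem.Int.floordiv n (PySem.Int.floordiv n l) ≤ n := by
        have hx : PySem.Int.floordiv n (PySem.Int.floordiv n l) < n + 1 := by
          rw [PySem.Int.floordiv_lt_iff_lt_mul (show (0:Int) < PySem.Int.floordiv n l by omega)]
          nlinarith
        omega
      have hblock := pv_block_sum a b n l (PySem.Int.floordiv n (PySem.Int.floordiv n l))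
        (PySem.Int.floordiv n l)
        (fun s hs1 hs2 => pv_block_const n l s (PySem.Int.floordiv n l) hl hln rfl hs1 hs2)
      have hsplit : PySem.List.pyRange l (n + 1) 1 =
          PySem.List.pyRange l (PySem.Int.floordiv n (PySem.Int.floordiv n l) + 1) 1 ++
          PySem.List.pyRange (PySem.Int.floordiv n (PySem.Int.floordiv n l) + 1) (n + 1) 1 :=
        PySem.List.pyRange_one_append l _ (n + 1) (by omega) (by omega)
      rw [pvALoop, dif_pos ⟨hl, hln⟩]
      rw [hsplit, List.map_append, List.sum_append]
      by_cases hskip : a < PySem.Int.floordiv n l ∨ b < PySem.Int.floordiv n l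
      · rw [if_pos hskip, ih _ ans (by omega) (by omega)]
        simp only [if_pos hskip] at hblock
        rw [hblock]; ring
      · rw [if_neg hskip, ih _ _ (by omega) (by omega)]
        simp only [if_neg hskip] at hblock
        split_ifs with hfeas
        · simp only [if_pos hfeas] at hblock
          rw [hblock]; ring
        · simp only [if_neg hfeas] at hblock
          rw [hblock]; ring
    · rw [pvALoop, dif_neg (by omega), PySem.List.pyRange_one_eq_nil (by omega)]
      simp

-- B's recursion on a segment [lo, hi] ⊆ [1, n] returns the per-s contributions over s = lo .. hi
theorem pvGo_eq_sum (a b n : Int) : ∀ (k : Nat) (lo hi : Int), (hi - lo).toNat ≤ k → 1 ≤ lo →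
    hi ≤ n → pvGo a b n lo hi = ((PySem.List.pyRange lo (hi + 1) 1).map (pvC a b n)).sum := by
  intro k
  induction k with
  | zero =>
    intro lo hi hk h1 h2
    rw [pvGo]
    by_cases hd : hi < lo
    · rw [dif_pos hd, PySem.List.pyRange_one_eq_nil (by omega)]
      simp
    · -- hi = lo: a one-element leaf
      have hlh : hi = lo := by omega
      rw [dif_neg hd, dif_neg (by rw [hlh]; exact fun h => h rfl)]
      have hblock := pv_block_sum a b n lo hi (PySem.Int.floordiv n hi)
        (fun s hs1 hs2 => by rw [show s = hi by omega])
      rw [hblock]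
      dsimp only
      split_ifs <;> omega
  | succ k ih =>
    intro lo hi hk h1 h2
    rw [pvGo]
    by_cases hd : hi < lo
    · rw [dif_pos hd, PySem.List.pyRange_one_eq_nil (by omega)]
      simp
    · rw [dif_neg hd]
      by_cases hg : PySem.Int.floordiv n hi ≠ PySem.Int.floordiv n lo
      · -- split at the midpoint
        rw [dif_pos hg]
        have hlt : lo < hi := by
          rcases lt_or_eq_of_le (show lo ≤ hi by omega) with h | h
          · exact h
          · exact absurd (by rw [h]) hg
        have hm := pv_mid lo hi hlt
        rw [ih lo (PySem.Int.floordiv (lo + hi) 2) (by omega) h1 (by omega),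
          ih (PySem.Int.floordiv (lo + hi) 2 + 1) hi (by omega) (by omega) h2]
        rw [PySem.List.pyRange_one_append lo (PySem.Int.floordiv (lo + hi) 2 + 1) (hi + 1)
          (by omega) (by omega)]
        rw [List.map_append, List.sum_append]
      · -- constant-quotient leaf
        rw [dif_neg hg]
        have hg2 : PySem.Int.floordiv n hi = PySem.Int.floordiv n lo := not_not.mp hg
        have hn1 : 1 ≤ n := by omega
        have hconst : ∀ s, lo ≤ s → s ≤ hi → PySem.Int.floordiv n s = PySem.Int.floordiv n hi := by
          intro s hs1 hs2
          have ha1 : PySem.Int.floordiv n hi ≤ PySem.Int.floordiv n s :=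
            pv_div_anti n s hi (by omega) (by omega) hs2
          have ha2 : PySem.Int.floordiv n s ≤ PySem.Int.floordiv n lo :=
            pv_div_anti n lo s (by omega) (by omega) hs1
          omega
        rw [pv_block_sum a b n lo hi (PySem.Int.floordiv n hi) hconst]
        dsimp only
        split_ifs <;> omega

-- ===== VERDICT (by name: the statement is the Claim_ definition above) =====
theorem count_different_periods_spec : Claim_equal_count_different_periods := by
  intro a b _
  unfold Spec_count_different_periods count_different_periods count_different_periods_alt
  rw [pvALoop_eq_sum a b (a + b) ((a + b + 1) - 1).toNat 1 0 (le_refl _) (le_refl _),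
    pvGo_eq_sum a b (a + b) ((a + b) - 1).toNat 1 (a + b) (le_refl _) (le_refl _) (le_refl _)]
  ring
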